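-- pv_equiv track=rewrite | github.com/GrCOTE7/python | tools/various/width_tests.py | auto_partitionOri
-- ===== SOURCE A (Python) =====
-- def auto_partitionOri(data, L):
--     """Découpe la liste 'data' en sous-groupes en fonction de L."""
--     partitions = []
--     index = 0
--     sizes = []
--
--     # Génération dynamique des tailles de groupe en fonction de L
--     while sum(sizes) < L:
--         next_size = 3 if len(sizes) % 3 == 0 else (1 if len(sizes) % 3 == 1 else 2)
--         if sum(sizes) + next_size > L:
--             next_size = L - sum(sizes)  # Ajuster pour ne pas dépasser L
--         sizes.append(next_size)
--
--     # Découpage des éléments selon les tailles calculées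
--     for size in sizes:
--         partitions.append(tuple(data[index : index + size]))
--         index += size
--
--     return partitions
-- ===== SOURCE B (Python) =====
-- def auto_partitionOri(data, L):
--     """Découpe la liste 'data' en sous-groupes en fonction de L (boucle unique)."""
--     partitions = []
--     index = 0
--     i = 0
--     remaining = L
--     while remaining > 0:
--         size = min((3, 1, 2)[i % 3], remaining)
--         partitions.append(tuple(data[index : index + size]))
--         index += size
--         remaining -= size
--         i += 1
--     return partitions
-- ===== Notes on version B (the rewrite author's own statement) =====
-- stated objective: faster
-- what changed: B fuses A's two phases into one loop: instead of building an explicit sizes list (re-summing it on every iteration, quadratic in the number of groups) and then re-scanning it to slice, B keeps a running remainder and emits each clamped group directly.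
import Mathlib
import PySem

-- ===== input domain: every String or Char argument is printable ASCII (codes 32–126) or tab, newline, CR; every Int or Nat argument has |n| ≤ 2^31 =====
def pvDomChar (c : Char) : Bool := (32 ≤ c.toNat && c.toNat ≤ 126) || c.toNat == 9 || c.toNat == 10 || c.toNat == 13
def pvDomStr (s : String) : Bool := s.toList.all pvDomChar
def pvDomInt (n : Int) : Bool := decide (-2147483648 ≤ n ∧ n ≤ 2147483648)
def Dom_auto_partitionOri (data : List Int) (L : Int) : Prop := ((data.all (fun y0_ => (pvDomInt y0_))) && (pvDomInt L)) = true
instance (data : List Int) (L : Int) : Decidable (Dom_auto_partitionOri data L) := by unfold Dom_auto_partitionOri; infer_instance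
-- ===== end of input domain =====

-- B fuses A's sizes-table phase and slicing phase into one loop with a running remainder; return values proved equal on Dom.

-- ===== PORT A =====
-- while sum(sizes) < L: append next clamped size.  Fuel = L.toNat only makes the
-- recursion total; each iteration appends a size >= 1, so fuel never runs out first.
def pvBuildSizes : Nat → List Int → Int → List Int
  | 0, sizes, _ => sizes
  | fuel + 1, sizes, L =>
    if sizes.sum < L then
      let next_size : Int :=
        if sizes.length % 3 == 0 then 3 else if sizes.length % 3 == 1 then 1 else 2
      let next_size : Int := if sizes.sum + next_size > L then L - sizes.sum else next_size
      pvBuildSizes fuel (sizes ++ [next_size]) L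
    else sizes

-- for size in sizes: partitions.append(tuple(data[index:index+size])); index += size
def pvCut (sizes : List Int) (index : Int) (data : List Int) : List (List Int) :=
  match sizes with
  | [] => []
  | size :: rest =>
    PySem.List.slice data (some index) (some (index + size)) :: pvCut rest (index + size) data

def auto_partitionOri (data : List Int) (L : Int) : List (List Int) :=
  pvCut (pvBuildSizes L.toNat [] L) 0 data

-- ===== PORT B =====
-- while remaining > 0: size = min((3,1,2)[i%3], remaining); emit data[index:index+size].
-- Same totality fuel L.toNat (size >= 1 each iteration).
def pvAltLoop : Nat → List Int → Int → Int → Nat → List (List Int)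
  | 0, _, _, _, _ => []
  | fuel + 1, data, index, remaining, i =>
    if remaining > 0 then
      let size : Int := min (([3, 1, 2] : List Int).getD (i % 3) 0) remaining
      PySem.List.slice data (some index) (some (index + size)) ::
        pvAltLoop fuel data (index + size) (remaining - size) (i + 1)
    else []

def auto_partitionOri_alt (data : List Int) (L : Int) : List (List Int) :=
  pvAltLoop L.toNat data 0 L 0

-- ===== PRECONDITION & SPEC =====
def Spec_auto_partitionOri (data : List Int) (L : Int) (out : List (List Int)) : Prop := out = auto_partitionOri_alt data L
instance (data : List Int) (L : Int) (out : List (List Int)) : Decidable (Spec_auto_partitionOri data L out) := by unfold Spec_auto_partitionOri; infer_instance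

-- ===== CLAIM (what is proved, stated in full; the proofs are below) =====
def Claim_equal_auto_partitionOri : Prop := ∀ (data : List Int) (L : Int), Dom_auto_partitionOri data L → Spec_auto_partitionOri data L (auto_partitionOri data L)

-- ===== LEMMAS AND PROOFS =====

-- ===== VERDICT (by name: the statement is the Claim_ definition above) =====
-- pvCut distributes over append, shifting the index by the consumed sum.
theorem pvCut_append (xs ys : List Int) (index : Int) (data : List Int) :
    pvCut (xs ++ ys) index data = pvCut xs index data ++ pvCut ys (index + xs.sum) data := by
  induction xs generalizing index with
  | nil => simp [pvCut]
  | cons x xs ih => simp [pvCut, ih, add_assoc]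

-- Key invariant: slicing A's completed sizes list equals the already-emitted prefix
-- followed by B's fused loop run from the current remainder and counter.
theorem pvKey (fuel : Nat) (sizes : List Int) (L : Int) (data : List Int) (index : Int) :
    pvCut (pvBuildSizes fuel sizes L) index data =
      pvCut sizes index data ++
        pvAltLoop fuel data (index + sizes.sum) (L - sizes.sum) sizes.length := by
  induction fuel generalizing sizes index with
  | zero => simp [pvBuildSizes, pvAltLoop]
  | succ fuel ih =>
    by_cases h : sizes.sum < L
    · have hcyc : (([3, 1, 2] : List Int).getD (sizes.length % 3) 0) =
          (if sizes.length % 3 == 0 then (3 : Int) else if sizes.length % 3 == 1 then 1 else 2) := by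
        have h3 : sizes.length % 3 = 0 ∨ sizes.length % 3 = 1 ∨ sizes.length % 3 = 2 := by omega
        rcases h3 with h3 | h3 | h3 <;> simp [h3]
      set cyc : Int := if sizes.length % 3 == 0 then (3 : Int)
        else if sizes.length % 3 == 1 then 1 else 2 with hcycdef
      have hns : (if sizes.sum + cyc > L then L - sizes.sum else cyc) = min cyc (L - sizes.sum) := by
        rcases le_or_gt cyc (L - sizes.sum) with hle | hlt
        · rw [min_eq_left hle, if_neg (by omega)]
        · rw [min_eq_right (le_of_lt hlt), if_pos (by omega)]
      have hA : pvBuildSizes (fuel + 1) sizes L =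
          pvBuildSizes fuel (sizes ++ [min cyc (L - sizes.sum)]) L := by
        simp only [pvBuildSizes, if_pos h, ← hcycdef, hns]
      have hB : pvAltLoop (fuel + 1) data (index + sizes.sum) (L - sizes.sum) sizes.length =
          PySem.List.slice data (some (index + sizes.sum))
              (some (index + sizes.sum + min cyc (L - sizes.sum))) ::
            pvAltLoop fuel data (index + sizes.sum + min cyc (L - sizes.sum))
              (L - sizes.sum - min cyc (L - sizes.sum)) (sizes.length + 1) := by
        rw [pvAltLoop, if_pos (by omega), hcyc]
      rw [hA, ih, hB, pvCut_append, pvCut, pvCut]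
      simp [List.append_assoc, add_assoc, sub_sub]
    · rw [pvBuildSizes, if_neg h, pvAltLoop, if_neg (by omega), List.append_nil]

theorem auto_partitionOri_spec : Claim_equal_auto_partitionOri := by
  intro data L _
  show auto_partitionOri data L = auto_partitionOri_alt data L
  unfold auto_partitionOri auto_partitionOri_alt
  simpa [pvCut] using pvKey L.toNat [] L data 0
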